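-- pv_equiv track=rewrite | github.com/devandaniel9/kalkulator-dari-teks | Kalkulator-dari-teks-3.py | fungsi3
-- ===== SOURCE A (Python) =====
-- def fungsi3(a):
--     count = 0
--     check = True
--     for b in a:
--         if b == "*" or b == "/":
--             check = False
--             break
--         count += 1
--     if check:
--         count = 1
--     return count
-- ===== SOURCE B (Python) =====
-- def fungsi3(a):
--     p = a.find("*")
--     q = a.find("/")
--     if p < 0 and q < 0:
--         return 1
--     if p < 0:
--         return q
--     if q < 0:
--         return p
--     return min(p, q)
-- ===== Notes on version B (the rewrite author's own statement) =====
-- stated objective: idiomatic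
-- what changed: Replaces the fused manual counter-loop with break/flag by two str.find calls combined with a minimum.
import Mathlib
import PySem

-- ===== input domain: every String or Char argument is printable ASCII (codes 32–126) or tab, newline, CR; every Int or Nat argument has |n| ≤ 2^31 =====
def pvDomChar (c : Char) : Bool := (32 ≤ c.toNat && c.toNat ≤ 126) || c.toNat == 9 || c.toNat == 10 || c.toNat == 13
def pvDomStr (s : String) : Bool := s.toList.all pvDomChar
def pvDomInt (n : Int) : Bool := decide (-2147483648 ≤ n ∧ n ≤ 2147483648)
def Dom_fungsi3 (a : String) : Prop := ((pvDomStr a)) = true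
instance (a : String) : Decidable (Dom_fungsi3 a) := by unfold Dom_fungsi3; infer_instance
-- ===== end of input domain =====

-- B replaces A's fused counter-loop with flag and break by two str.find calls combined with a minimum (objective: idiomatic).

-- ===== PORT A =====
-- the for-loop: carries the running 'count'; stops with check=False at the first '*' or '/'
def fungsi3Loop : List Char → Int → Int × Bool
  | [], count => (count, true)
  | b :: rest, count =>
      if b = '*' ∨ b = '/' then (count, false)
      else fungsi3Loop rest (count + 1)

def fungsi3 (a : String) : Int :=
  let r := fungsi3Loop a.toList 0
  if r.2 then 1 else r.1

-- ===== PORT B =====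
def fungsi3_alt (a : String) : Int :=
  let p := PySem.Str.find a "*"
  let q := PySem.Str.find a "/"
  if p < 0 ∧ q < 0 then 1
  else if p < 0 then q
  else if q < 0 then p
  else min p q

-- ===== PRECONDITION & SPEC =====
def Spec_fungsi3 (a : String) (out : Int) : Prop := out = fungsi3_alt a
instance (a : String) (out : Int) : Decidable (Spec_fungsi3 a out) := by unfold Spec_fungsi3; infer_instance

-- ===== CLAIM (what is proved, stated in full; the proofs are below) =====
def Claim_equal_fungsi3 : Prop := ∀ (a : String), Dom_fungsi3 a → Spec_fungsi3 a (fungsi3 a)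

-- ===== LEMMAS AND PROOFS =====

-- find.go never returns an index below its starting offset (unless it returns -1)
theorem find_go_lb (sub : List Char) : ∀ (cs : List Char) (k : Nat),
    PySem.Chars.find.go sub cs k = -1 ∨ (k : Int) ≤ PySem.Chars.find.go sub cs k := by
  intro cs
  induction cs with
  | nil =>
      intro k
      simp only [PySem.Chars.find.go]
      split_ifs with h
      · exact Or.inr le_rfl
      · exact Or.inl rfl
  | cons c t ih =>
      intro k
      simp only [PySem.Chars.find.go]
      split_ifs with h
      · exact Or.inr le_rfl
      · rcases ih (k + 1) with h1 | h1
        · exact Or.inl h1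
        · refine Or.inr (le_trans ?_ h1)
          push_cast
          omega

theorem singleton_isPrefixOf (c : Char) (l : List Char) :
    [c].isPrefixOf l = true ↔ ∃ t, l = c :: t := by
  cases l with
  | nil => simp [List.isPrefixOf]
  | cons h t =>
      simp only [List.isPrefixOf, Bool.and_true, beq_iff_eq]
      constructor
      · intro h1; exact ⟨t, by rw [h1]⟩
      · rintro ⟨t', ht⟩; exact (List.cons.injEq _ _ _ _ ▸ ht).1.symm

-- the loop of A, expressed through the two find.go scans of B
theorem loop_eq_finds : ∀ (cs : List Char) (k : Nat),
    fungsi3Loop cs (k : Int) =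
      (let p := PySem.Chars.find.go ['*'] cs k
       let q := PySem.Chars.find.go ['/'] cs k
       if p < 0 ∧ q < 0 then (((k : Int) + cs.length), true)
       else ((if p < 0 then q else if q < 0 then p else min p q), false)) := by
  intro cs
  induction cs with
  | nil =>
      intro k
      simp [fungsi3Loop, PySem.Chars.find.go]
  | cons c t ih =>
      intro k
      by_cases hc : c = '*' ∨ c = '/'
      · have hne : ¬ (c = '*' ∧ c = '/') := by
          rintro ⟨h1, h2⟩; rw [h1] at h2; exact absurd h2 (by decide)
        simp only [fungsi3Loop, if_pos hc, PySem.Chars.find.go]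
        rcases hc with h | h
        · -- first char is '*': p = k
          have hp : [('*' : Char)].isPrefixOf (c :: t) = true := by
            rw [singleton_isPrefixOf]; exact ⟨t, by rw [h]⟩
          have hq : ¬ [('/' : Char)].isPrefixOf (c :: t) = true := by
            rw [singleton_isPrefixOf]
            rintro ⟨t', ht⟩
            have : c = '/' := (List.cons.injEq _ _ _ _ ▸ ht).1
            exact hne ⟨h, this⟩
          rw [if_pos hp, if_neg hq]
          have hk : ¬ ((k : Int) < 0) := by omega
          rcases find_go_lb ['/'] t (k + 1) with h1 | h1
          · simp [h1, hk]
          · have hq0 : ¬ (PySem.Chars.find.go ['/'] t (k + 1) < 0) := by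
              intro hlt; push_cast at h1; omega
            have hmin : min (k : Int) (PySem.Chars.find.go ['/'] t (k + 1)) = (k : Int) := by
              apply min_eq_left; push_cast at h1 ⊢; omega
            simp [hk, hq0, hmin]
        · -- first char is '/': q = k
          have hq : [('/' : Char)].isPrefixOf (c :: t) = true := by
            rw [singleton_isPrefixOf]; exact ⟨t, by rw [h]⟩
          have hp : ¬ [('*' : Char)].isPrefixOf (c :: t) = true := by
            rw [singleton_isPrefixOf]
            rintro ⟨t', ht⟩
            have : c = '*' := (List.cons.injEq _ _ _ _ ▸ ht).1
            exact hne ⟨this, h⟩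
          rw [if_neg hp, if_pos hq]
          have hk : ¬ ((k : Int) < 0) := by omega
          rcases find_go_lb ['*'] t (k + 1) with h1 | h1
          · simp [h1, hk]
          · have hp0 : ¬ (PySem.Chars.find.go ['*'] t (k + 1) < 0) := by
              intro hlt; push_cast at h1; omega
            have hmin : min (PySem.Chars.find.go ['*'] t (k + 1)) (k : Int) = (k : Int) := by
              apply min_eq_right; push_cast at h1 ⊢; omega
            simp [hk, hp0, hmin]
      · -- ordinary character: both scans and the loop step to the tail with offset k+1
        have hp : ¬ [('*' : Char)].isPrefixOf (c :: t) = true := by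
          rw [singleton_isPrefixOf]
          rintro ⟨t', ht⟩
          exact hc (Or.inl (List.cons.injEq _ _ _ _ ▸ ht).1)
        have hq : ¬ [('/' : Char)].isPrefixOf (c :: t) = true := by
          rw [singleton_isPrefixOf]
          rintro ⟨t', ht⟩
          exact hc (Or.inr (List.cons.injEq _ _ _ _ ▸ ht).1)
        simp only [fungsi3Loop, if_neg hc, PySem.Chars.find.go, if_neg hp, if_neg hq]
        have hcast : ((k : Int) + 1) = ((k + 1 : Nat) : Int) := by push_cast; ring
        rw [hcast, ih (k + 1)]
        simp only [List.length_cons]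
        push_cast
        split_ifs <;> simp <;> ring

-- ===== VERDICT (by name: the statement is the Claim_ definition above) =====
theorem fungsi3_spec : Claim_equal_fungsi3 := by
  intro a _
  unfold Spec_fungsi3 fungsi3 fungsi3_alt
  have h := loop_eq_finds a.toList 0
  simp only [Nat.cast_zero] at h
  simp only [PySem.Str.find, h]
  have h1 : PySem.Chars.find a.toList "*".toList = PySem.Chars.find.go ['*'] a.toList 0 := rfl
  have h2 : PySem.Chars.find a.toList "/".toList = PySem.Chars.find.go ['/'] a.toList 0 := rfl
  rw [h1, h2]
  split_ifs <;> simp_all
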